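-- pv_equiv track=rewrite | github.com/Purnachandhar-S/PythonProgramming | arraySumEasy.py | arraySum
-- ===== SOURCE A (Python) =====
-- def arraySum(nums):
--   result = []
--   for i in range(len(nums)):
--     if i ==0:
--       result.append(nums[i] *2)
--     else:
--       bigOne = max(nums[:i+1])
--       result.append(nums[i]+bigOne)
--   result1 = " ".join([str(x) for x in result])
--   return result1
-- ===== SOURCE B (Python) =====
-- def arraySum(nums):
--     if not nums:
--         return ""
--     out = []
--     m = nums[0]
--     for x in nums:
--         m = max(m, x)
--         out.append(x + m)
--     return " ".join(map(str, out))
-- ===== Notes on version B (the rewrite author's own statement) =====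
-- stated objective: faster
-- what changed: B maintains a running maximum in one pass instead of recomputing max(nums[:i+1]) over a fresh prefix slice at every index (and the i==0 special case folds into x+m since m=nums[0] there).
import Mathlib
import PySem

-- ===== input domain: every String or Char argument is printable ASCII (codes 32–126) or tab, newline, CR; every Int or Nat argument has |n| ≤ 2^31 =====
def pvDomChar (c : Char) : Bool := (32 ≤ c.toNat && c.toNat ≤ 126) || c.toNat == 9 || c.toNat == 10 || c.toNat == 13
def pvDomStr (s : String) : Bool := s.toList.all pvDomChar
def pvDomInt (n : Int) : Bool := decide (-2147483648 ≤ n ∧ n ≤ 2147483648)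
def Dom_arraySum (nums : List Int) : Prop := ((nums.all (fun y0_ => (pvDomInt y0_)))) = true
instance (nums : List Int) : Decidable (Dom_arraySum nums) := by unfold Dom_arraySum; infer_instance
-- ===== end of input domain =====

-- B replaces A's per-index prefix-slice max with a single-pass running maximum (O(n) vs O(n^2)); return values proved identical.


-- ===== PORT A =====
-- literal port: loop over range(len(nums)); nums[i] with 0 ≤ i < len is always in range, so getD's
-- default is unreachable; max(nums[:i+1]) via PySem.List.max? on the slice (nonempty there, so some).
def arraySum (nums : List Int) : String :=
  let result : List Int :=
    (List.range nums.length).foldl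
      (fun result i =>
        if i = 0 then
          result ++ [nums.getD i 0 * 2]
        else
          let bigOne : Int :=
            (PySem.List.max? (PySem.List.slice nums none (some ((i : Int) + 1))) (fun y => y)).getD 0
          result ++ [nums.getD i 0 + bigOne])
      []
  PySem.Str.join " " (result.map PySem.Int.toStr)

-- ===== PORT B =====
-- one pass: m is the running maximum (m = max(m, x)), emitting x + m for each x
def arraySumAltGo (m : Int) (xs : List Int) : List Int :=
  match xs with
  | [] => []
  | x :: rest => (x + max m x) :: arraySumAltGo (max m x) rest

def arraySum_alt (nums : List Int) : String :=
  match nums with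
  | [] => ""
  | x :: _ => PySem.Str.join " " ((arraySumAltGo x nums).map PySem.Int.toStr)

-- ===== PRECONDITION & SPEC =====
def Spec_arraySum (nums : List Int) (out : String) : Prop := out = arraySum_alt nums
instance (nums : List Int) (out : String) : Decidable (Spec_arraySum nums out) := by unfold Spec_arraySum; infer_instance

-- ===== CLAIM (what is proved, stated in full; the proofs are below) =====
def Claim_equal_arraySum : Prop := ∀ (nums : List Int), Dom_arraySum nums → Spec_arraySum nums (arraySum nums)

-- ===== LEMMAS AND PROOFS =====

-- the append-accumulator loop of A over range n is a map (branch shape preserved)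
theorem foldl_range_append_if (n : Nat) (f g : Nat → Int) (acc : List Int) :
    (List.range n).foldl (fun r i => if i = 0 then r ++ [f i] else r ++ [g i]) acc
      = acc ++ (List.range n).map (fun i => if i = 0 then f i else g i) := by
  induction n generalizing acc with
  | zero => simp
  | succ k ih =>
    rw [List.range_succ, List.foldl_append, List.map_append, ih]
    by_cases hk : k = 0 <;> simp [hk]

theorem arraySumAltGo_length (xs : List Int) (m : Int) :
    (arraySumAltGo m xs).length = xs.length := by
  induction xs generalizing m with
  | nil => simp [arraySumAltGo]
  | cons x rest ih => simp [arraySumAltGo, ih]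

theorem arraySumAltGo_getElem (xs : List Int) (m : Int) (i : Nat) (hi : i < xs.length)
    (hi' : i < (arraySumAltGo m xs).length) :
    (arraySumAltGo m xs)[i] = xs[i] + (xs.take (i + 1)).foldl max m := by
  induction xs generalizing m i with
  | nil => simp at hi
  | cons x rest ih =>
    cases i with
    | zero => simp [arraySumAltGo]
    | succ j =>
      have hj : j < rest.length := by simpa using hi
      have hj' : j < (arraySumAltGo (max m x) rest).length := by
        rw [arraySumAltGo_length]; exact hj
      simp only [arraySumAltGo, List.getElem_cons_succ, List.take_succ_cons, List.foldl_cons]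
      exact ih (max m x) j hj hj'

-- ===== VERDICT (by name: the statement is the Claim_ definition above) =====
theorem arraySum_spec : Claim_equal_arraySum := by
  intro nums _
  unfold Spec_arraySum
  cases nums with
  | nil => rfl
  | cons h t =>
    show arraySum (h :: t) = arraySum_alt (h :: t)
    simp only [arraySum, arraySum_alt]
    rw [foldl_range_append_if]
    rw [List.nil_append]
    congr 1
    congr 1
    apply List.ext_getElem
    · simp [arraySumAltGo_length]
    · intro i hi hi'
      have hlen : i < (h :: t).length := by simpa using hi
      have hgo : i < (arraySumAltGo h (h :: t)).length := by
        rw [arraySumAltGo_length]; exact hlen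
      simp only [List.getElem_map, List.getElem_range]
      rw [arraySumAltGo_getElem (h :: t) h i hlen hgo]
      cases i with
      | zero =>
        simp
        ring
      | succ j =>
        have hjt : j + 1 < (h :: t).length := hlen
        have hc : ((j + 1 : Nat) : Int) + 1 = ((j + 2 : Nat) : Int) := by push_cast; ring
        rw [if_neg (Nat.succ_ne_zero j), hc, PySem.List.slice_to_natCast]
        have htake : (h :: t).take (j + 2) = h :: t.take (j + 1) := List.take_succ_cons
        rw [htake, PySem.List.max?_id_cons, Option.getD_some,
          List.getD_eq_getElem _ _ hjt, List.foldl_cons, max_self]
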